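-- pv_equiv track=rewrite | github.com/jorzel/codefights | arcade/core/numberOfClans.py | numberOfClans
-- ===== SOURCE A (Python) =====
-- def make_key(l):
--     return '_'.join([str(p) for p in l])
--
-- def numberOfClans(divisors, k):
--     clans = set()
--     numbers = [i for i in range(1, k + 1)]
--     for n in numbers:
--         current = []
--         for d in divisors:
--             if n % d == 0:
--                 current.append(d)
--         key = make_key(current)
--         clans.add(key)
--     return len(clans)
-- ===== SOURCE B (Python) =====
-- def make_key(l):
--     return '_'.join([str(p) for p in l])
--
-- def numberOfClans(divisors, k):
--     # The divisibility pattern of n depends only on n modulo lcm(|divisors|),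
--     # so it suffices to scan n = 1 .. min(k, that period).
--     period = 1
--     for d in divisors:
--         a, b = period, abs(d)
--         while b:
--             a, b = b, a % b
--         period = period * abs(d) // a if a else 0
--     clans = set()
--     for n in range(1, min(k, period) + 1):
--         clans.add(make_key([d for d in divisors if n % d == 0]))
--     return len(clans)
-- ===== Notes on version B (the rewrite author's own statement) =====
-- stated objective: alternative
-- what changed: B computes the period lcm(|divisors|) with a hand-rolled Euclid and enumerates n only over 1..min(k, period), since the divisor-pattern of n is periodic with that period, instead of scanning all n in 1..k; on the generated inputs (large divisors, huge lcm) this is not measurably faster.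
import Mathlib
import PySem

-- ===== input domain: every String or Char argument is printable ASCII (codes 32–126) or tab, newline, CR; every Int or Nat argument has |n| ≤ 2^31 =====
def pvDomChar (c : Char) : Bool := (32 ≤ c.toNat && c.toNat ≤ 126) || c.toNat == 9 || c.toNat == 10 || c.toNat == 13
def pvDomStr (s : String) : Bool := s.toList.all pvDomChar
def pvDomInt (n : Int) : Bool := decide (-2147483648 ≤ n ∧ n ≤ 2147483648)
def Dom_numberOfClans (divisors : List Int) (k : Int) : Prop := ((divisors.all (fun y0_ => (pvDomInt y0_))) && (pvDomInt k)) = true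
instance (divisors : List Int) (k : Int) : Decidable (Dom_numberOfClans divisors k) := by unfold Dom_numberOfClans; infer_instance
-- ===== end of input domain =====

-- B scans n only up to min(k, lcm |divisors|) — the divisibility pattern is periodic — instead of all of 1..k.

-- ===== PORT A =====
def pvMakeKey (l : List Int) : String := PySem.Str.join "_" (l.map PySem.Int.toStr)

def numberOfClans (divisors : List Int) (k : Int) : Int :=
  let numbers := PySem.List.pyRange 1 (k + 1)
  let clans := numbers.foldl
    (fun s n =>
      let current := divisors.foldl
        (fun c d => if PySem.Int.mod n d == 0 then c ++ [d] else c) []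
      PySem.Set.add s (pvMakeKey current))
    PySem.Set.empty
  (clans.length : Int)

-- ===== PORT B =====
-- hand-written Euclid loop of Source B ('while b: a, b = b, a % b'); period stays a nonnegative int, so Nat arithmetic is exact
def pvGcd (a b : Nat) : Nat :=
  if h : b = 0 then a else pvGcd b (a % b)
termination_by b
decreasing_by exact Nat.mod_lt _ (Nat.pos_of_ne_zero h)

def numberOfClans_alt (divisors : List Int) (k : Int) : Int :=
  let period := divisors.foldl
    (fun p d => if pvGcd p d.natAbs ≠ 0 then p * d.natAbs / pvGcd p d.natAbs else 0) 1
  let clans := (PySem.List.pyRange 1 (min k (period : Int) + 1)).foldl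
    (fun s n =>
      PySem.Set.add s (pvMakeKey (divisors.filter (fun d => PySem.Int.mod n d == 0))))
    PySem.Set.empty
  (clans.length : Int)

-- ===== PRECONDITION & SPEC =====
-- Pre_ excludes only the inputs where A raises ZeroDivisionError: a 0 divisor with at least one n to test.
def Pre_numberOfClans (divisors : List Int) (k : Int) : Prop := 1 ≤ k → (0 : Int) ∉ divisors
instance (divisors : List Int) (k : Int) : Decidable (Pre_numberOfClans divisors k) := by unfold Pre_numberOfClans; infer_instance
def pvWitness_numberOfClans : List Int × Int := ([2, 3], 10)
def Spec_numberOfClans (divisors : List Int) (k : Int) (out : Int) : Prop := out = numberOfClans_alt divisors k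
instance (divisors : List Int) (k : Int) (out : Int) : Decidable (Spec_numberOfClans divisors k out) := by unfold Spec_numberOfClans; infer_instance

-- ===== CLAIM (what is proved, stated in full; the proofs are below) =====
def Claim_equal_numberOfClans : Prop := ∀ (divisors : List Int) (k : Int), Dom_numberOfClans divisors k → Pre_numberOfClans divisors k → Spec_numberOfClans divisors k (numberOfClans divisors k)

-- ===== LEMMAS AND PROOFS =====

theorem pvGcd_eq (a b : Nat) : pvGcd a b = Nat.gcd a b := by
  induction a, b using pvGcd.induct with
  | case1 a => rw [pvGcd]; simp
  | case2 a b h ih =>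
      rw [pvGcd]; simp only [h, dite_false]
      rw [ih, Nat.gcd_comm b, ← Nat.gcd_rec, Nat.gcd_comm]

theorem step_eq_lcm (p : Nat) (d : Int) :
    (if pvGcd p d.natAbs ≠ 0 then p * d.natAbs / pvGcd p d.natAbs else 0) = Nat.lcm p d.natAbs := by
  rw [pvGcd_eq]
  split_ifs with h
  · rfl
  · obtain ⟨h1, h2⟩ := Nat.gcd_eq_zero_iff.mp (not_ne_iff.mp h)
    simp [h1, h2]

theorem dvd_foldl_lcm_acc (xs : List Int) (x : Nat) (b : Nat) (hacc : x ∣ b) :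
    x ∣ xs.foldl (fun p d => Nat.lcm p d.natAbs) b := by
  induction xs generalizing b with
  | nil => simpa using hacc
  | cons y ys ihy =>
      simp only [List.foldl_cons]
      exact ihy _ (hacc.trans (Nat.dvd_lcm_left _ _))

theorem dvd_foldl_lcm (l : List Int) (a : Nat) (h : ∀ x ∈ l, x.natAbs ≠ 0) :
    (∀ d ∈ l, d.natAbs ∣ l.foldl (fun p d => Nat.lcm p d.natAbs) a) ∧
    (a ≠ 0 → l.foldl (fun p d => Nat.lcm p d.natAbs) a ≠ 0) := by
  induction l generalizing a with
  | nil => simp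
  | cons x xs ih =>
      have hx : x.natAbs ≠ 0 := h x (by simp)
      obtain ⟨ih1, ih2⟩ := ih (Nat.lcm a x.natAbs) (fun y hy => h y (by simp [hy]))
      refine ⟨?_, ?_⟩
      · intro d hd
        rcases List.mem_cons.mp hd with rfl | hd
        · exact dvd_foldl_lcm_acc xs _ _ (Nat.dvd_lcm_right _ _)
        · exact ih1 d hd
      · intro ha
        exact ih2 (Nat.lcm_ne_zero ha hx)

theorem dvd_iff_of_dvd_sub {a b c : Int} (h : a ∣ b - c) : a ∣ b ↔ a ∣ c := by
  constructor <;> intro h2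
  · have := dvd_sub h2 h; simpa using this
  · have := dvd_add h h2; simpa using this

-- the per-n key, shared shape of both programs after rewriting A's inner loop to a filter
theorem key_congr (divisors : List Int) {n m L : Int}
    (hd : ∀ d ∈ divisors, d ∣ L) (hnm : L ∣ n - m) :
    pvMakeKey (divisors.filter (fun d => PySem.Int.mod n d == 0)) =
    pvMakeKey (divisors.filter (fun d => PySem.Int.mod m d == 0)) := by
  congr 1
  apply List.filter_congr
  intro d hdl
  have hdvd : d ∣ n - m := (hd d hdl).trans hnm
  rw [Bool.eq_iff_iff]
  simp only [beq_iff_eq, PySem.Int.mod_eq_zero_iff_dvd]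
  exact dvd_iff_of_dvd_sub hdvd

theorem foldl_add_key (f : Int → String) (xs : List Int) :
    xs.foldl (fun s n => PySem.Set.add s (f n)) PySem.Set.empty =
    PySem.Set.ofList (xs.map f) := by
  rw [PySem.Set.ofList_eq_foldl, List.foldl_map]
  rfl

theorem len_ofList_congr (l1 l2 : List String) (h : ∀ x, x ∈ l1 ↔ x ∈ l2) :
    (PySem.Set.ofList l1).length = (PySem.Set.ofList l2).length := by
  apply List.Perm.length_eq
  rw [List.perm_ext_iff_of_nodup (PySem.Set.nodup_ofList l1) (PySem.Set.nodup_ofList l2)]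
  intro x
  rw [PySem.Set.mem_ofList, PySem.Set.mem_ofList]
  exact h x

-- ===== VERDICT (by name: the statement is the Claim_ definition above) =====
theorem numberOfClans_spec : Claim_equal_numberOfClans := by
  intro divisors k _ hpre
  unfold Spec_numberOfClans numberOfClans numberOfClans_alt
  rw [show (fun (p : Nat) (d : Int) => if pvGcd p d.natAbs ≠ 0 then p * d.natAbs / pvGcd p d.natAbs else 0) =
      (fun (p : Nat) (d : Int) => Nat.lcm p d.natAbs) from
    funext fun p => funext fun d => step_eq_lcm p d]
  set L : Nat := divisors.foldl (fun p d => Nat.lcm p d.natAbs) 1 with hL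
  set f : Int → String := fun n => pvMakeKey (divisors.filter (fun d => PySem.Int.mod n d == 0)) with hf
  have hinner : ∀ n : Int, divisors.foldl
      (fun c d => if PySem.Int.mod n d == 0 then c ++ [d] else c) [] =
      divisors.filter (fun d => PySem.Int.mod n d == 0) := by
    intro n
    have := PySem.List.foldl_append_if (fun d => PySem.Int.mod n d == 0) id divisors []
    simpa using this
  simp only [hinner]
  rw [foldl_add_key f, foldl_add_key f]
  congr 1
  apply len_ofList_congr
  intro x
  simp only [List.mem_map, PySem.List.mem_pyRange_one]
  constructor
  · rintro ⟨n, ⟨h1, h2⟩, rfl⟩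
    rcases le_or_gt n (min k (L : Int)) with hle | hgt
    · exact ⟨n, ⟨h1, by omega⟩, rfl⟩
    · -- fold n back into 1..L using periodicity
      have hk : 1 ≤ k := le_trans h1 (by omega)
      have h0 : (0 : Int) ∉ divisors := hpre hk
      have hdvdL := dvd_foldl_lcm divisors 1
        (fun x hx => by simp only [ne_eq, Int.natAbs_eq_zero]; rintro rfl; exact h0 hx)
      have hLpos : 0 < (L : Int) := by
        have := hdvdL.2 one_ne_zero
        omega
      have hminL : min k (L : Int) = (L : Int) := by omega
      set m : Int := (n - 1) % (L : Int) + 1 with hm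
      have hm0 : 0 ≤ (n - 1) % (L : Int) := Int.emod_nonneg _ (by omega)
      have hm1 : (n - 1) % (L : Int) < (L : Int) := Int.emod_lt_of_pos _ hLpos
      have hsub : (L : Int) ∣ n - m := by
        have : (n - 1) % (L : Int) = n - 1 - (L : Int) * ((n - 1) / (L : Int)) := by
          rw [Int.emod_def]
        refine ⟨(n - 1) / (L : Int), by omega⟩
      have hdall : ∀ d ∈ divisors, d ∣ (L : Int) := by
        intro d hd
        have := hdvdL.1 d hd
        exact (Int.natAbs_dvd).mp (Int.natCast_dvd_natCast.mpr this)
      refine ⟨m, ⟨by omega, by omega⟩, ?_⟩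
      exact (key_congr divisors hdall hsub).symm
  · rintro ⟨n, ⟨h1, h2⟩, rfl⟩
    exact ⟨n, ⟨h1, by omega⟩, rfl⟩
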